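-- pv_equiv track=rewrite | github.com/hivdb/hivdb-DTG | preset/statistics.py | calc_contigency_table
-- ===== SOURCE A (Python) =====
-- def calc_contigency_table(listA, listB):
--
--     match_list = list(zip(listA, listB))
--
--     both = [
--         1
--         for i, j in match_list
--         if i and j
--     ]
--
--     i_only = [
--         1
--         for i, j in match_list
--         if i and not j
--     ]
--
--     j_only = [
--         1
--         for i, j in match_list
--         if not i and j
--     ]
--
--     none = [
--         1
--         for i, j in match_list
--         if not i and not j
--     ]
--
--     return {
--         'both': len(both),
--         'i_only': len(i_only),
--         'j_only': len(j_only),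
--         'none': len(none)
--     }
-- ===== SOURCE B (Python) =====
-- def calc_contigency_table(listA, listB):
--     both = i_only = j_only = none = 0
--     for i, j in zip(listA, listB):
--         if i and j:
--             both += 1
--         elif i:
--             i_only += 1
--         elif j:
--             j_only += 1
--         else:
--             none += 1
--     return {'both': both, 'i_only': i_only, 'j_only': j_only, 'none': none}
-- ===== Notes on version B (the rewrite author's own statement) =====
-- stated objective: faster
-- what changed: Replaces four separate list-comprehension scans over the zipped pairs (building four throwaway lists of 1s and taking their lengths) with a single pass over zip maintaining four integer counters.
import Mathlib
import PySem

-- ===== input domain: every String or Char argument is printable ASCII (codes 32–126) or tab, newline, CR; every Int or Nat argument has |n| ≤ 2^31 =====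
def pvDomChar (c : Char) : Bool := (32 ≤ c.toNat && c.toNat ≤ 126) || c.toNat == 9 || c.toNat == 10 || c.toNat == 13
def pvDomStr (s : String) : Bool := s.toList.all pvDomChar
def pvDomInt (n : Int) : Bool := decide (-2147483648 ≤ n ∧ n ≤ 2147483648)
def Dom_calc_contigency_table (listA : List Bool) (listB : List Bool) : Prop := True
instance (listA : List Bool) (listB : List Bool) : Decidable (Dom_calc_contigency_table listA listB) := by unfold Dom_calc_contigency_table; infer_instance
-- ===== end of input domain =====

-- B replaces A's four separate comprehension scans over the zipped pairs with one fold keeping four counters (simpler, single pass).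

-- ===== PORT A =====
-- Port of A: zip, four filtered comprehensions of 1s, lengths of those lists.
def calc_contigency_table (listA : List Bool) (listB : List Bool) : List (String × Int) :=
  let match_list := listA.zip listB
  let both := (match_list.filter (fun p => p.1 && p.2)).map (fun _ => (1 : Int))
  let i_only := (match_list.filter (fun p => p.1 && !p.2)).map (fun _ => (1 : Int))
  let j_only := (match_list.filter (fun p => !p.1 && p.2)).map (fun _ => (1 : Int))
  let none_ := (match_list.filter (fun p => !p.1 && !p.2)).map (fun _ => (1 : Int))
  [("both", (both.length : Int)), ("i_only", (i_only.length : Int)),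
   ("j_only", (j_only.length : Int)), ("none", (none_.length : Int))]

-- ===== PORT B =====
-- Port of B: one fold over zip maintaining four counters.
def calc_contigency_table_alt (listA : List Bool) (listB : List Bool) : List (String × Int) :=
  let c := (listA.zip listB).foldl
    (fun (acc : Int × Int × Int × Int) p =>
      if p.1 && p.2 then (acc.1 + 1, acc.2.1, acc.2.2.1, acc.2.2.2)
      else if p.1 then (acc.1, acc.2.1 + 1, acc.2.2.1, acc.2.2.2)
      else if p.2 then (acc.1, acc.2.1, acc.2.2.1 + 1, acc.2.2.2)
      else (acc.1, acc.2.1, acc.2.2.1, acc.2.2.2 + 1))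
    (0, 0, 0, 0)
  [("both", c.1), ("i_only", c.2.1), ("j_only", c.2.2.1), ("none", c.2.2.2)]

-- ===== PRECONDITION & SPEC =====
def Spec_calc_contigency_table (listA : List Bool) (listB : List Bool) (out : List (String × Int)) : Prop := out = calc_contigency_table_alt listA listB
instance (listA : List Bool) (listB : List Bool) (out : List (String × Int)) : Decidable (Spec_calc_contigency_table listA listB out) := by unfold Spec_calc_contigency_table; infer_instance

-- ===== CLAIM (what is proved, stated in full; the proofs are below) =====
def Claim_equal_calc_contigency_table : Prop := ∀ (listA : List Bool) (listB : List Bool), Dom_calc_contigency_table listA listB → Spec_calc_contigency_table listA listB (calc_contigency_table listA listB)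

-- ===== LEMMAS AND PROOFS =====

-- ===== VERDICT (by name: the statement is the Claim_ definition above) =====
lemma fold_counts (l : List (Bool × Bool)) (a b c d : Int) :
    l.foldl
      (fun (acc : Int × Int × Int × Int) p =>
        if p.1 && p.2 then (acc.1 + 1, acc.2.1, acc.2.2.1, acc.2.2.2)
        else if p.1 then (acc.1, acc.2.1 + 1, acc.2.2.1, acc.2.2.2)
        else if p.2 then (acc.1, acc.2.1, acc.2.2.1 + 1, acc.2.2.2)
        else (acc.1, acc.2.1, acc.2.2.1, acc.2.2.2 + 1))
      (a, b, c, d)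
    = (a + (l.filter (fun p => p.1 && p.2)).length,
       b + (l.filter (fun p => p.1 && !p.2)).length,
       c + (l.filter (fun p => !p.1 && p.2)).length,
       d + (l.filter (fun p => !p.1 && !p.2)).length) := by
  induction l generalizing a b c d with
  | nil => simp
  | cons hd tl ih =>
    obtain ⟨i, j⟩ := hd
    cases i <;> cases j <;>
      (rw [List.foldl_cons]
       dsimp only
       rw [ih, List.filter_cons, List.filter_cons, List.filter_cons, List.filter_cons]
       simp only [Bool.and_self, Bool.and_true, Bool.and_false, Bool.not_true, Bool.not_false,
         if_true, List.length_cons, Prod.mk.injEq]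
       push_cast
       refine ⟨by ring, by ring, by ring, by ring⟩)

theorem calc_contigency_table_spec : Claim_equal_calc_contigency_table := by
  intro listA listB _
  unfold Spec_calc_contigency_table calc_contigency_table calc_contigency_table_alt
  simp only [fold_counts]
  simp
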